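-- pv_equiv track=rewrite | github.com/EricTan1/DanMemoDiscordBot | DanMemoDiscordBot/commands/unitsearch/skillSearch.py | filterAddRemove
-- ===== SOURCE A (Python) =====
-- from typing import List, Tuple, Dict
--
-- def filterAddRemove(page_list: List[list], current_filter: str, name: str, total_results: int) -> Tuple[List[list], str, int]:
--     if name == current_filter:
--         current_filter = "none"
--         return page_list, current_filter, total_results
--     # else
--     current_filter = name
--     current_page_list = []
--     temp_page: List[list] = []
--     current_page_list.append(temp_page)
--     count = 0
--     for pages in page_list:
--         for skills in pages:
--             is_filtered = True
--             if(not(current_filter == skills[0][2])):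
--                 is_filtered = False
--             if is_filtered:
--                 temp_page.append(skills)
--                 count += 1
--             if len(temp_page) == 5:
--                 temp_page =[]
--                 current_page_list.append(temp_page)
--     # remove last empty list
--     if(len(current_page_list[len(current_page_list)-1]) == 0):
--         current_page_list.pop(len(current_page_list)-1)
--     return (current_page_list, current_filter, count)
-- ===== SOURCE B (Python) =====
-- from typing import List, Tuple
--
-- def filterAddRemove(page_list: List[list], current_filter: str, name: str, total_results: int) -> Tuple[List[list], str, int]:
--     if name == current_filter:
--         return page_list, "none", total_results
--     # filter-then-slice: flatten all pages, keep matching skills, chunk by 5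
--     filtered = [s for pages in page_list for s in pages if s[0][2] == name]
--     current_page_list = [filtered[i:i + 5] for i in range(0, len(filtered), 5)]
--     return (current_page_list, name, len(filtered))
-- ===== Notes on version B (the rewrite author's own statement) =====
-- stated objective: simpler
-- what changed: Replaces the interleaved filter-while-buffering pass (temp_page mutated in place inside the result, trailing empty page popped) by a two-phase filter-then-slice decomposition: one flattening comprehension collects the matches, then chunks of 5 are cut by slicing.
import Mathlib
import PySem

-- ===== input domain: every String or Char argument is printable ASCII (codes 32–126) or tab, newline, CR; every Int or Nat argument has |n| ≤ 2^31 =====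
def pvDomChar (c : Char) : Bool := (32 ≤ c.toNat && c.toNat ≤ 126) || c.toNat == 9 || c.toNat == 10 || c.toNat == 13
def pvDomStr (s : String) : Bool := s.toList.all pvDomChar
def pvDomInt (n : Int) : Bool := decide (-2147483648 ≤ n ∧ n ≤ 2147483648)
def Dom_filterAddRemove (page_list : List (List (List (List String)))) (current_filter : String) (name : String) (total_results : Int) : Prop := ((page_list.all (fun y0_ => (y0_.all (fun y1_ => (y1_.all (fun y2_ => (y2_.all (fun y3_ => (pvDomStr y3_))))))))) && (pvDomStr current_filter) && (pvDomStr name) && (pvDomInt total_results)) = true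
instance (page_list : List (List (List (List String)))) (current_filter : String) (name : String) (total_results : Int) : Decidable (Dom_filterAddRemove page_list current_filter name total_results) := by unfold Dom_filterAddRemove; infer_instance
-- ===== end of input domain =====

-- B replaces A's interleaved filter-while-buffering pass by a filter-then-slice decomposition (simpler; same cost).


-- ===== PORT A =====
-- shared predicate: Python's `skills[0][2] == name` (pyGet? = none exactly where Python raises; Pre_ excludes that)
def pvMatch (name : String) (skills : List (List String)) : Bool :=
  ((PySem.List.pyGet? skills 0).bind (fun r => PySem.List.pyGet? r 2)) == some name

-- A's loop state: current_page_list = done ++ [temp] (temp is the aliased temp_page), plus count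
def filterAddRemove (page_list : List (List (List (List String)))) (current_filter : String) (name : String) (total_results : Int) : List (List (List (List String))) × String × Int :=
  if name == current_filter then (page_list, "none", total_results)
  else
    let st := page_list.foldl (fun st pages =>
      pages.foldl (fun st skills =>
        let done := st.1
        let temp := st.2.1
        let count := st.2.2
        let tc := if pvMatch name skills then (temp ++ [skills], count + 1) else (temp, count)
        if tc.1.length = 5 then (done ++ [tc.1], ([] : List (List (List String))), tc.2)
        else (done, tc.1, tc.2)) st)
      (([], [], 0) : List (List (List (List String))) × List (List (List String)) × Int)
    -- remove last empty list (the last element of current_page_list is always temp)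
    ((if st.2.1.length = 0 then st.1 else st.1 ++ [st.2.1]), name, st.2.2)

-- ===== PORT B =====
def filterAddRemove_alt (page_list : List (List (List (List String)))) (current_filter : String) (name : String) (total_results : Int) : List (List (List (List String))) × String × Int :=
  if name == current_filter then (page_list, "none", total_results)
  else
    let filtered := page_list.flatMap (fun pages => pages.filter (pvMatch name))
    ((PySem.List.pyRange 0 (filtered.length : Int) 5).map
        (fun i => PySem.List.slice filtered (some i) (some (i + 5))),
     name, (filtered.length : Int))

-- ===== PRECONDITION & SPEC =====
-- Pre_ excludes exactly the inputs where Python A raises IndexError: name ≠ current_filter and some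
-- skills entry has no element or a first element shorter than 3 (skills[0][2] fails).
def Pre_filterAddRemove (page_list : List (List (List (List String)))) (current_filter : String) (name : String) (total_results : Int) : Prop :=
  name = current_filter ∨
    ∀ pages ∈ page_list, ∀ s ∈ pages, s ≠ [] ∧ 3 ≤ (s.headI).length
instance (page_list : List (List (List (List String)))) (current_filter : String) (name : String) (total_results : Int) : Decidable (Pre_filterAddRemove page_list current_filter name total_results) := by unfold Pre_filterAddRemove; infer_instance

def pvWitness_filterAddRemove : List (List (List (List String))) × String × String × Int :=
  ([[[["a", "b", "aaa"], ["z"]]]], "none", "aaa", 1)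

def Spec_filterAddRemove (page_list : List (List (List (List String)))) (current_filter : String) (name : String) (total_results : Int) (out : List (List (List (List String))) × String × Int) : Prop := out = filterAddRemove_alt page_list current_filter name total_results
instance (page_list : List (List (List (List String)))) (current_filter : String) (name : String) (total_results : Int) (out : List (List (List (List String))) × String × Int) : Decidable (Spec_filterAddRemove page_list current_filter name total_results out) := by unfold Spec_filterAddRemove; infer_instance

-- ===== CLAIM (what is proved, stated in full; the proofs are below) =====
def Claim_equal_filterAddRemove : Prop := ∀ (page_list : List (List (List (List String)))) (current_filter : String) (name : String) (total_results : Int), Dom_filterAddRemove page_list current_filter name total_results → Pre_filterAddRemove page_list current_filter name total_results → Spec_filterAddRemove page_list current_filter name total_results (filterAddRemove page_list current_filter name total_results)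

-- ===== LEMMAS AND PROOFS =====

-- greedy chunking into pages of 5: the common value both ports compute
def chunk5 {α : Type} (l : List α) : List (List α) :=
  if l = [] then [] else l.take 5 :: chunk5 (l.drop 5)
termination_by l.length
decreasing_by
  have : l.length ≠ 0 := by simpa [List.length_eq_zero_iff] using ‹l ≠ []›
  simp [List.length_drop]; omega

theorem chunk5_short {α : Type} (l : List α) (h : l.length < 5) :
    chunk5 l = if l = [] then [] else [l] := by
  rw [chunk5]
  by_cases hl : l = []
  · simp [hl]
  · have hd : l.drop 5 = [] := List.drop_eq_nil_of_le (by omega)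
    rw [chunk5]
    simp [hl, hd, List.take_of_length_le (by omega : l.length ≤ 5)]

theorem chunk5_cons_full {α : Type} (t : List α) (s : α) (r : List α)
    (h : (t ++ [s]).length = 5) :
    chunk5 (t ++ s :: r) = (t ++ [s]) :: chunk5 r := by
  have he : t ++ s :: r = (t ++ [s]) ++ r := by simp
  rw [he, chunk5, if_neg (by simp)]
  rw [← h, List.take_left, List.drop_left]

-- A's inner step on one `skills` item
def stepA (name : String) (st : List (List (List (List String))) × List (List (List String)) × Int)
    (skills : List (List String)) : List (List (List (List String))) × List (List (List String)) × Int :=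
  let tc := if pvMatch name skills then (st.2.1 ++ [skills], st.2.2 + 1) else (st.2.1, st.2.2)
  if tc.1.length = 5 then (st.1 ++ [tc.1], ([] : List (List (List String))), tc.2)
  else (st.1, tc.1, tc.2)

-- loop invariant: folding A's step from (done, temp, c) with |temp| < 5 produces exactly
-- done ++ chunk5 (temp ++ matches), temp' the last partial chunk, count c + #matches
theorem loopA (name : String) :
    ∀ (l : List (List (List String))) (done : List (List (List (List String))))
      (temp : List (List (List String))) (c : Int), temp.length < 5 →
      (let st := l.foldl (stepA name) (done, temp, c)
       ((if st.2.1.length = 0 then st.1 else st.1 ++ [st.2.1]), st.2.2)) =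
      (done ++ chunk5 (temp ++ l.filter (pvMatch name)),
       c + ((l.filter (pvMatch name)).length : Int)) := by
  intro l
  induction l with
  | nil =>
    intro done temp c htemp
    simp only [List.foldl_nil, List.filter_nil, List.append_nil, List.length_nil, Int.natCast_zero,
      add_zero]
    rw [chunk5_short temp htemp]
    by_cases h : temp = [] <;> simp [h]
  | cons s l ih =>
    intro done temp c htemp
    by_cases hm : pvMatch name s
    · by_cases hfull : (temp ++ [s]).length = 5
      · have h1 : stepA name (done, temp, c) s = (done ++ [temp ++ [s]], [], c + 1) := by
          simp [stepA, hm, hfull]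
        rw [List.foldl_cons, h1, ih (done ++ [temp ++ [s]]) [] (c + 1) (by simp)]
        rw [List.filter_cons_of_pos hm, chunk5_cons_full temp s _ hfull]
        simp; omega
      · have h4 : temp.length ≠ 4 := by
          simp only [List.length_append, List.length_cons, List.length_nil] at hfull; omega
        have h1 : stepA name (done, temp, c) s = (done, temp ++ [s], c + 1) := by
          simp [stepA, hm, h4]
        have hlen : (temp ++ [s]).length < 5 := by
          simp only [List.length_append, List.length_cons, List.length_nil] at hfull ⊢; omega
        rw [List.foldl_cons, h1, ih done (temp ++ [s]) (c + 1) hlen]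
        rw [List.filter_cons_of_pos hm]
        simp; omega
    · have h1 : stepA name (done, temp, c) s = (done, temp, c) := by
        have : temp.length ≠ 5 := by omega
        simp [stepA, hm, this]
      rw [List.foldl_cons, h1, ih done temp c htemp, List.filter_cons_of_neg hm]

-- B's slicing loop computes chunk5
theorem chunk5_eq_map_range {α : Type} : ∀ (l : List α),
    chunk5 l = (List.range ((l.length + 4) / 5)).map (fun k => (l.drop (5 * k)).take 5) := by
  intro l
  rw [chunk5]
  by_cases hl : l = []
  · simp [hl]
  · have hpos : 0 < l.length := List.length_pos_of_ne_nil hl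
    rw [if_neg hl]
    have hsplit : (l.length + 4) / 5 = ((l.drop 5).length + 4) / 5 + 1 := by
      simp only [List.length_drop]; omega
    rw [hsplit, List.range_succ_eq_map, List.map_cons, List.map_map]
    refine congrArg₂ List.cons (by simp) ?_
    rw [chunk5_eq_map_range (l.drop 5)]
    simp only [List.length_drop]
    apply List.map_congr_left
    intro k _
    simp only [Function.comp_apply, List.drop_drop]
    congr 2
    omega
termination_by l => l.length
decreasing_by
  have : 0 < l.length := List.length_pos_of_ne_nil hl
  simp [List.length_drop]; omega

theorem sliceB_eq_chunk5 {α : Type} (l : List α) :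
    (PySem.List.pyRange 0 (l.length : Int) 5).map
        (fun i => PySem.List.slice l (some i) (some (i + 5))) = chunk5 l := by
  rw [chunk5_eq_map_range, PySem.List.pyRange_of_pos 0 (l.length : Int) (by norm_num)]
  have hn : (if (0 : Int) < (l.length : Int) then (((l.length : Int) - 0 + 5 - 1) / 5).toNat else 0)
      = (l.length + 4) / 5 := by
    by_cases h : 0 < l.length
    · rw [if_pos (by exact_mod_cast h : (0:Int) < (l.length : Int))]
      have : ((l.length : Int) - 0 + 5 - 1) = ((l.length + 4 : Nat) : Int) := by push_cast; ring
      rw [this]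
      omega
    · have h0 : l.length = 0 := by omega
      simp [h0]
  rw [hn, List.map_map]
  apply List.map_congr_left
  intro k _
  simp only [Function.comp_apply, zero_add]
  have h5 : (5 : Int) * (k : Int) = ((5 * k : Nat) : Int) := by push_cast; ring
  have h55 : (5 : Int) * (k : Int) + 5 = ((5 * k : Nat) : Int) + ((5 : Nat) : Int) := by
    push_cast; ring
  rw [h55, h5, PySem.List.slice_natCast_add l (5 * k) 5]

-- ===== VERDICT (by name: the statement is the Claim_ definition above) =====
theorem filterAddRemove_spec : Claim_equal_filterAddRemove := by
  intro page_list current_filter name total_results _ _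
  unfold Spec_filterAddRemove filterAddRemove filterAddRemove_alt
  by_cases hn : (name == current_filter) = true
  · simp [hn]
  · simp only [hn, Bool.false_eq_true, if_false]
    have hstep : (fun (st : List (List (List (List String))) × List (List (List String)) × Int) skills =>
        let done := st.1
        let temp := st.2.1
        let count := st.2.2
        let tc := if pvMatch name skills then (temp ++ [skills], count + 1) else (temp, count)
        if tc.1.length = 5 then (done ++ [tc.1], ([] : List (List (List String))), tc.2)
        else (done, tc.1, tc.2)) = stepA name := by
      funext st skills; rfl
    have hflat : page_list.foldl (fun st pages => pages.foldl (stepA name) st)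
        (([], [], 0) : List (List (List (List String))) × List (List (List String)) × Int)
        = page_list.flatten.foldl (stepA name) ([], [], 0) := (List.foldl_flatten).symm
    simp only [hstep, hflat]
    have hloop := loopA name page_list.flatten [] [] 0 (by simp)
    simp only [List.nil_append, zero_add] at hloop
    have hF : page_list.flatMap (fun pages => pages.filter (pvMatch name))
        = page_list.flatten.filter (pvMatch name) := by
      rw [List.flatMap_def, ← List.filter_flatten]
    rw [hF, sliceB_eq_chunk5]
    have h1 := congrArg Prod.fst hloop
    have h2 := congrArg Prod.snd hloop
    simp only at h1 h2
    exact Prod.ext h1 (Prod.ext rfl h2)
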